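-- pv_equiv track=rewrite | github.com/OpenPecha/cursive_work_sheets | src/cursive_work_sheet/get_text_lines.py | get_each_line
-- ===== SOURCE A (Python) =====
-- def get_each_line(token_count, chunks):
--     line = ""
--     lines = []
--     num = 0
--     total = 0
--     for _, token in enumerate(chunks):
--         line += token
--         num += 1
--         total += 1
--         if num == token_count and total < len(chunks):
--             lines.append(line)
--             line = ""
--             num = 0
--         elif total == len(chunks):
--             lines.append(line)
--     return lines
-- ===== SOURCE B (Python) =====
-- def get_each_line(token_count, chunks):
--     if not chunks:
--         return []
--     if token_count <= 0:
--         return ["".join(chunks)]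
--     return ["".join(chunks[i:i + token_count])
--             for i in range(0, len(chunks), token_count)]
-- ===== Notes on version B (the rewrite author's own statement) =====
-- stated objective: simpler
-- what changed: Replaced the token-by-token counter loop maintaining line/num/total state by a group-level comprehension that joins slices chunks[i:i+token_count] at group starts i = 0, token_count, 2*token_count, ..., with explicit guards for empty chunks and non-positive token_count (where A's counter never fires and it emits one line joining everything).
import Mathlib
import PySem

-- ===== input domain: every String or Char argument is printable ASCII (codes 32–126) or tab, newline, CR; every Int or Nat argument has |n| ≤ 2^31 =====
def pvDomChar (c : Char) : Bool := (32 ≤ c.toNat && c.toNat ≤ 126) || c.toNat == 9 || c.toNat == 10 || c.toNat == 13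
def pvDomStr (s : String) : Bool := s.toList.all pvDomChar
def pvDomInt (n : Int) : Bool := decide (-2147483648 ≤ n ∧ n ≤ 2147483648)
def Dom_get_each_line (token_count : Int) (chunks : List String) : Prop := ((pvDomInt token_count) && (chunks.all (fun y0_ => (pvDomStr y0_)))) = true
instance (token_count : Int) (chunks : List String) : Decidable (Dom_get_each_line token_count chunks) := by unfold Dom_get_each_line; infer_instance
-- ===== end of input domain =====

-- B replaces A's token-by-token counter loop by a comprehension over group starts
-- (objective: simpler — a different decomposition of the same O(n) work).

-- ===== PORT A =====
-- the loop body of A: state = (line, lines, num, total)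
def stepA (token_count n : Int) : String × List String × Int × Int → String → String × List String × Int × Int
  | (line0, lines, num0, total0), token =>
    let line := line0 ++ token
    let num := num0 + 1
    let total := total0 + 1
    if num = token_count ∧ total < n then
      ("", lines ++ [line], 0, total)
    else if total = n then
      (line, lines ++ [line], num, total)
    else
      (line, lines, num, total)

def get_each_line (token_count : Int) (chunks : List String) : List String :=
  (List.foldl (fun st p => stepA token_count (chunks.length : Int) st p.2)
      ("", [], 0, 0) (PySem.List.enumerate chunks 0)).2.1

-- ===== PORT B =====
def get_each_line_alt (token_count : Int) (chunks : List String) : List String :=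
  if chunks = [] then []
  else if token_count ≤ 0 then [PySem.Str.join "" chunks]
  else (PySem.List.pyRange 0 (chunks.length : Int) token_count).map
        (fun i => PySem.Str.join "" (PySem.List.slice chunks (some i) (some (i + token_count))))

-- ===== PRECONDITION & SPEC =====
def Spec_get_each_line (token_count : Int) (chunks : List String) (out : List String) : Prop := out = get_each_line_alt token_count chunks
instance (token_count : Int) (chunks : List String) (out : List String) : Decidable (Spec_get_each_line token_count chunks out) := by unfold Spec_get_each_line; infer_instance

-- ===== CLAIM (what is proved, stated in full; the proofs are below) =====
def Claim_equal_get_each_line : Prop := ∀ (token_count : Int) (chunks : List String), Dom_get_each_line token_count chunks → Spec_get_each_line token_count chunks (get_each_line token_count chunks)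

-- ===== LEMMAS AND PROOFS =====

-- "".join lemmas
theorem intersperse_nil_flatten (l : List (List Char)) :
    (List.intersperse ([] : List Char) l).flatten = l.flatten := by
  induction l with
  | nil => simp
  | cons a t ih => cases t <;> simp_all

theorem strJoin_nil : PySem.Str.join "" ([] : List String) = "" := by
  rw [← String.toList_inj]
  simp [PySem.Str.join, PySem.Chars.join, List.intercalate]

theorem strJoin_cons (x : String) (l : List String) :
    PySem.Str.join "" (x :: l) = x ++ PySem.Str.join "" l := by
  rw [← String.toList_inj]
  simp [PySem.Str.join, PySem.Chars.join, List.intercalate, intersperse_nil_flatten]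

theorem strJoin_singleton (x : String) : PySem.Str.join "" [x] = x := by
  rw [strJoin_cons, strJoin_nil]
  exact String.append_empty

-- the reference grouping: lines of tc tokens, last line takes the remainder
def grp (tc : Nat) : List String → List String
  | [] => []
  | x :: xs => PySem.Str.join "" (x :: xs.take (tc - 1)) :: grp tc (xs.drop (tc - 1))
  termination_by l => l.length
  decreasing_by simp

theorem grp_nil (tc : Nat) : grp tc [] = [] := by
  rw [grp]

theorem grp_cons (tc : Nat) (x : String) (xs : List String) :
    grp tc (x :: xs) = PySem.Str.join "" (x :: xs.take (tc - 1)) :: grp tc (xs.drop (tc - 1)) := by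
  rw [grp]

-- partial first line: line already holds some tokens, c tokens of capacity remain
def G (tc c : Nat) (line : String) (rest : List String) : List String :=
  if rest.length ≤ c then [line ++ PySem.Str.join "" rest]
  else (line ++ PySem.Str.join "" (rest.take c)) :: grp tc (rest.drop c)

theorem G_eq_grp (tc : Nat) (htc : 1 ≤ tc) (l : List String) (hl : l ≠ []) :
    G tc tc "" l = grp tc l := by
  match l with
  | x :: xs =>
    rw [G, grp_cons]
    by_cases h : (x :: xs).length ≤ tc
    · rw [if_pos h]
      have h1 : xs.take (tc - 1) = xs := List.take_of_length_le (by simp at h; omega)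
      have h2 : xs.drop (tc - 1) = [] := List.drop_eq_nil_of_le (by simp at h; omega)
      rw [h1, h2, grp_nil]
      simp
    · rw [if_neg h]
      have h1 : (x :: xs).take tc = x :: xs.take (tc - 1) := by
        conv_lhs => rw [show tc = (tc - 1) + 1 from by omega]
        rw [List.take_succ_cons]
      have h2 : (x :: xs).drop tc = xs.drop (tc - 1) := by
        conv_lhs => rw [show tc = (tc - 1) + 1 from by omega]
        rw [List.drop_succ_cons]
      rw [h1, h2]
      simp

-- fold over enumerate, index unused, equals fold over the list
theorem foldl_enumerate_snd {S : Type} (f : S → String → S) :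
    ∀ (xs : List String) (s : Int) (st : S),
      List.foldl (fun st p => f st p.2) st (PySem.List.enumerate xs s) = List.foldl f st xs := by
  intro xs
  induction xs with
  | nil => intro s st; simp [PySem.List.enumerate]
  | cons x xs ih =>
    intro s st
    rw [PySem.List.enumerate_cons]
    simpa using ih (s + 1) (f st x)

theorem A_unfold (token_count : Int) (chunks : List String) :
    get_each_line token_count chunks
      = (List.foldl (stepA token_count (chunks.length : Int)) ("", [], 0, 0) chunks).2.1 := by
  rw [get_each_line, foldl_enumerate_snd]

-- A's loop when token_count ≤ 0: num + 1 never hits token_count, one line at the end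
theorem A_loop_nonpos (tc n : Int) (htc : tc ≤ 0) :
    ∀ (rest : List String), rest ≠ [] → ∀ (line : String) (acc : List String) (num : Int),
      0 ≤ num →
      (List.foldl (stepA tc n) (line, acc, num, n - rest.length) rest).2.1
        = acc ++ [line ++ PySem.Str.join "" rest] := by
  intro rest
  induction rest with
  | nil => intro h; exact absurd rfl h
  | cons x xs ih =>
    intro _ line acc num hnum
    simp only [List.foldl_cons, stepA]
    match xs with
    | [] =>
      rw [if_neg (by simp only [List.length_cons, List.length_nil]; push_cast; omega)]
      rw [if_pos (by simp only [List.length_cons, List.length_nil]; push_cast; omega)]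
      simp [strJoin_singleton]
    | y :: ys =>
      rw [if_neg ?h1]
      case h1 => simp only [List.length_cons]; push_cast; omega
      rw [if_neg ?h2]
      case h2 => simp only [List.length_cons]; push_cast; omega
      have harg : n - ((x :: y :: ys).length : Int) + 1 = n - ((y :: ys).length : Int) := by
        simp only [List.length_cons]; omega
      rw [harg, ih (by simp) (line ++ x) acc (num + 1) (by omega)]
      simp [strJoin_cons, String.append_assoc]

-- A's loop when 0 < token_count: invariant, c = remaining capacity of the current line
theorem A_loop (tc : Nat) (htc : 1 ≤ tc) (n : Int) :
    ∀ (rest : List String), rest ≠ [] → ∀ (line : String) (acc : List String) (c : Nat),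
      1 ≤ c → c ≤ tc →
      (List.foldl (stepA (tc : Int) n) (line, acc, (tc : Int) - (c : Int), n - rest.length) rest).2.1
        = acc ++ G tc c line rest := by
  intro rest
  induction rest with
  | nil => intro h; exact absurd rfl h
  | cons x xs ih =>
    intro _ line acc c hc1 hc2
    simp only [List.foldl_cons, stepA]
    match xs with
    | [] =>
      rw [if_neg (by simp only [List.length_cons, List.length_nil]; push_cast; omega)]
      rw [if_pos (by simp only [List.length_cons, List.length_nil]; push_cast; omega)]
      simp only [List.foldl_nil]
      rw [G, if_pos (by simp only [List.length_cons, List.length_nil]; omega)]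
      simp [strJoin_singleton]
    | y :: ys =>
      have harg : n - ((x :: y :: ys).length : Int) + 1 = n - ((y :: ys).length : Int) := by
        simp only [List.length_cons]; omega
      by_cases hc : c = 1
      · subst hc
        rw [if_pos (by simp only [List.length_cons]; omega)]
        have h0 : (0 : Int) = (tc : Int) - (tc : Int) := by omega
        rw [harg, h0, ih (by simp) "" (acc ++ [line ++ x]) tc htc le_rfl]
        rw [G_eq_grp tc htc _ (by simp)]
        rw [G, if_neg (by simp)]
        have h1 : (x :: y :: ys).take 1 = [x] := rfl
        have h2 : (x :: y :: ys).drop 1 = y :: ys := rfl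
        rw [h1, h2, strJoin_singleton]
        simp
      · rw [if_neg ?h3]
        case h3 => simp only [List.length_cons]; push_cast; omega
        rw [if_neg ?h4]
        case h4 => simp only [List.length_cons]; push_cast; omega
        have hnum : (tc : Int) - (c : Int) + 1 = (tc : Int) - ((c - 1 : Nat) : Int) := by
          omega
        rw [harg, hnum, ih (by simp) (line ++ x) acc (c - 1) (by omega) (by omega)]
        have hG : G tc c line (x :: y :: ys) = G tc (c - 1) (line ++ x) (y :: ys) := by
          rw [G, G]
          by_cases h : (x :: y :: ys).length ≤ c
          · rw [if_pos h, if_pos (by simp at h ⊢; omega)]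
            rw [strJoin_cons, String.append_assoc]
          · rw [if_neg h, if_neg (by simp at h ⊢; omega)]
            have h1 : (x :: y :: ys).take c = x :: (y :: ys).take (c - 1) := by
              conv_lhs => rw [show c = (c - 1) + 1 from by omega]
              rw [List.take_succ_cons]
            have h2 : (x :: y :: ys).drop c = (y :: ys).drop (c - 1) := by
              conv_lhs => rw [show c = (c - 1) + 1 from by omega]
              rw [List.drop_succ_cons]
            rw [h1, h2, strJoin_cons, String.append_assoc]
        rw [hG]

-- pyRange with positive step: cons and shift
theorem pyRange_pos_cons (a b s : Int) (hs : 0 < s) (hab : a < b) :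
    PySem.List.pyRange a b s = a :: PySem.List.pyRange (a + s) b s := by
  rw [PySem.List.pyRange_of_pos _ _ hs, PySem.List.pyRange_of_pos _ _ hs]
  by_cases h : a + s < b
  · rw [if_pos hab, if_pos h]
    have h1 : b - a + s - 1 = (b - (a + s) + s - 1) + 1 * s := by ring
    have h2 : (0 : Int) ≤ (b - (a + s) + s - 1) / s := Int.ediv_nonneg (by omega) (by omega)
    have hc : ((b - a + s - 1) / s).toNat = ((b - (a + s) + s - 1) / s).toNat + 1 := by
      rw [h1, Int.add_mul_ediv_right _ _ (by omega : s ≠ 0)]; omega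
    rw [hc, List.range_succ_eq_map, List.map_cons, List.map_map]
    congr 1
    · simp
    · apply List.map_congr_left
      intro k _
      simp [Function.comp]
      ring
  · rw [if_pos hab, if_neg h]
    have h0 : (b - a + s - 1) / s = 1 := by
      have he : b - a + s - 1 = (b - a - 1) + 1 * s := by ring
      rw [he, Int.add_mul_ediv_right _ _ (by omega : s ≠ 0),
        Int.ediv_eq_zero_of_lt (by omega) (by omega)]
      norm_num
    rw [h0]
    simp

theorem pyRange_shift (b c s : Int) (hs : 0 < s) :
    PySem.List.pyRange c b s = (PySem.List.pyRange 0 (b - c) s).map (· + c) := by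
  rw [PySem.List.pyRange_of_pos _ _ hs, PySem.List.pyRange_of_pos _ _ hs, List.map_map]
  have hif : (if c < b then ((b - c + s - 1) / s).toNat else 0)
      = (if (0 : Int) < b - c then ((b - c - 0 + s - 1) / s).toNat else 0) := by
    by_cases h : c < b
    · rw [if_pos h, if_pos (by omega)]; norm_num
    · rw [if_neg h, if_neg (by omega)]
  rw [hif]
  apply List.map_congr_left
  intro k _
  simp; ring

theorem pyRange_pos_nil (a b s : Int) (hs : 0 < s) (hab : b ≤ a) :
    PySem.List.pyRange a b s = [] := by
  rw [PySem.List.pyRange_of_pos _ _ hs, if_neg (by omega)]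
  simp

theorem slice_shift (l : List String) (t : Int) (ht : 0 ≤ t) (i : Int) (hi : 0 ≤ i) :
    PySem.List.slice l (some (i + t)) (some (i + t + t))
      = PySem.List.slice (l.drop t.toNat) (some i) (some (i + t)) := by
  rw [PySem.List.slice_toNat _ (by omega) (by omega), PySem.List.slice_toNat _ hi (by omega),
    List.drop_drop]
  congr 1
  · omega
  · congr 1; omega

-- B's comprehension equals the reference grouping
theorem B_eq_grp (tc : Int) (htc : 0 < tc) :
    ∀ (N : Nat) (l : List String), l.length = N →
      (PySem.List.pyRange 0 (l.length : Int) tc).map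
          (fun i => PySem.Str.join "" (PySem.List.slice l (some i) (some (i + tc))))
        = grp tc.toNat l := by
  intro N
  induction N using Nat.strong_induction_on with
  | _ N ih =>
    intro l hl
    match l with
    | [] => simp [grp, PySem.List.pyRange]
    | x :: xs =>
      rw [pyRange_pos_cons 0 _ tc htc (by simp), List.map_cons]
      have hhead : PySem.Str.join "" (PySem.List.slice (x :: xs) (some 0) (some (0 + tc)))
          = PySem.Str.join "" (x :: xs.take (tc.toNat - 1)) := by
        have h0 : (0 : Int) + tc = tc := by omega
        rw [h0, PySem.List.slice_toNat _ le_rfl (by omega)]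
        simp only [Int.toNat_zero, List.drop_zero, Nat.sub_zero]
        conv_lhs => rw [show tc.toNat = (tc.toNat - 1) + 1 from by omega, List.take_succ_cons]
      rw [hhead]
      rw [zero_add, pyRange_shift _ tc tc htc, List.map_map]
      have htail : (List.map
            ((fun i => PySem.Str.join "" (PySem.List.slice (x :: xs) (some i) (some (i + tc)))) ∘
              (· + tc))
            (PySem.List.pyRange 0 ((x :: xs).length - tc) tc))
          = grp tc.toNat ((x :: xs).drop tc.toNat) := by
        by_cases hle : tc ≤ ((x :: xs).length : Int)
        · have hlen : (((x :: xs).drop tc.toNat).length : Int) = ((x :: xs).length : Int) - tc := by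
            rw [List.length_drop]; omega
          rw [← hlen]
          have hcong : (List.map
                ((fun i => PySem.Str.join "" (PySem.List.slice (x :: xs) (some i) (some (i + tc)))) ∘
                  (· + tc))
                (PySem.List.pyRange 0 ((((x :: xs).drop tc.toNat).length : Int)) tc))
              = List.map
                (fun i => PySem.Str.join "" (PySem.List.slice ((x :: xs).drop tc.toNat) (some i) (some (i + tc))))
                (PySem.List.pyRange 0 ((((x :: xs).drop tc.toNat).length : Int)) tc) := by
            apply List.map_congr_left
            intro k hk
            have hk0 : 0 ≤ k := ((PySem.List.mem_pyRange_iff_of_pos htc k).1 hk).1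
            simp only [Function.comp]
            rw [show k + tc + tc = k + tc + tc from rfl]
            rw [slice_shift (x :: xs) tc (by omega) k hk0]
          rw [hcong]
          exact ih ((x :: xs).drop tc.toNat).length
            (by rw [List.length_drop, ← hl]; simp only [List.length_cons]; omega) _ rfl
        · rw [pyRange_pos_nil _ _ _ htc (by omega)]
          rw [List.drop_eq_nil_of_le (by simp only [List.length_cons] at hle ⊢; omega)]
          rw [grp_nil]
          rfl
      rw [htail]
      rw [grp_cons]
      have hd : List.drop tc.toNat (x :: xs) = List.drop (tc.toNat - 1) xs := by
        conv_lhs => rw [show tc.toNat = (tc.toNat - 1) + 1 from by omega]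
        rw [List.drop_succ_cons]
      rw [hd]

-- ===== VERDICT (by name: the statement is the Claim_ definition above) =====
theorem get_each_line_spec : Claim_equal_get_each_line := by
  intro token_count chunks _
  unfold Spec_get_each_line
  rw [A_unfold, get_each_line_alt]
  match chunks with
  | [] => simp
  | x :: xs =>
    rw [if_neg (by simp)]
    by_cases htc : token_count ≤ 0
    · rw [if_pos htc]
      have hA := A_loop_nonpos token_count (((x :: xs).length : Int)) htc (x :: xs) (by simp)
        "" [] 0 le_rfl
      rw [show ((x :: xs).length : Int) - ((x :: xs).length : Int) = 0 from by omega] at hA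
      rw [hA]
      simp
    · rw [if_neg htc]
      replace htc : 0 < token_count := by omega
      have hA := A_loop token_count.toNat (by omega) (((x :: xs).length : Int)) (x :: xs) (by simp)
        "" [] token_count.toNat (by omega) le_rfl
      rw [show ((token_count.toNat : Int)) = token_count from by omega] at hA
      rw [show token_count - token_count = 0 from by omega] at hA
      rw [show ((x :: xs).length : Int) - ((x :: xs).length : Int) = 0 from by omega] at hA
      rw [B_eq_grp token_count htc (x :: xs).length (x :: xs) rfl]
      rw [hA, G_eq_grp token_count.toNat (by omega) _ (by simp)]
      simp
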